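-- pv_equiv track=rewrite | github.com/Sujeong-Baek/Programmers | Level 1/1.대충만든자판.py | create_letter2num
-- ===== SOURCE A (Python) =====
-- def create_letter2num(keymap): # ["ABACD", "BCEFD"]
--     letter2num = {}
--     for key in keymap: # key: "ABACD"
--         for i,k in enumerate(key,1):
--             if not k in letter2num:
--                 letter2num[k]=i
--             elif letter2num[k] > i:
--                 letter2num[k]=i
--     return letter2num
-- ===== SOURCE B (Python) =====
-- def create_letter2num(keymap):
--     table = {}
--     for key in keymap:
--         for i, k in enumerate(key, 1):
--             table.setdefault(k, []).append(i)
--     return {letter: min(positions) for letter, positions in table.items()}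
-- ===== Notes on version B (the rewrite author's own statement) =====
-- stated objective: alternative
-- what changed: B replaces A's online running-minimum dict update with a collect-then-reduce decomposition: one pass groups every 1-based position of each letter into a list, a second pass reduces each list to its minimum.
import Mathlib
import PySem

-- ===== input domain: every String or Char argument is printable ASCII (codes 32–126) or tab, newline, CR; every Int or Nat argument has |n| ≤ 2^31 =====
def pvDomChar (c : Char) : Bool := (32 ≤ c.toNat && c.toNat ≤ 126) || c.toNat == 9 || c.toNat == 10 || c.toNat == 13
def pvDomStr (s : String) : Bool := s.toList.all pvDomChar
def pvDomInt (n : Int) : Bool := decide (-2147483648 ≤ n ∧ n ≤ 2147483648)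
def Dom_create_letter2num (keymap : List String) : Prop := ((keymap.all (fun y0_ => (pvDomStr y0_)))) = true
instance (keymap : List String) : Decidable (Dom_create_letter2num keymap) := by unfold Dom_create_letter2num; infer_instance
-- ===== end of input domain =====

-- B replaces A's online running-minimum update with a collect-all-positions-then-reduce decomposition (same asymptotic cost).

-- ===== PORT A =====
-- literal port of A: one dict holding the running minimum, updated while scanning
def create_letter2num (keymap : List String) : List (String × Int) :=
  (keymap.foldl (fun d key =>
      (PySem.List.enumerate key.toList 1).foldl (fun d ik =>
        let ks := String.mk [ik.2]
        match d.get? ks with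
        | none => d.insert ks ik.1
        | some v => if v > ik.1 then d.insert ks ik.1 else d) d)
    PySem.Dict.empty).items

-- ===== PORT B =====
-- literal port of B: first pass groups all 1-based positions per letter, second pass takes each list's min
def create_letter2num_alt (keymap : List String) : List (String × Int) :=
  let table : PySem.Dict String (List Int) :=
    keymap.foldl (fun d key =>
      (PySem.List.enumerate key.toList 1).foldl
        (fun d ik => d.modify (String.mk [ik.2]) [] (· ++ [ik.1])) d)
      PySem.Dict.empty
  table.items.map (fun p => (p.1, PySem.List.minD p.2 (fun x => x) 0))

-- ===== PRECONDITION & SPEC =====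
def Spec_create_letter2num (keymap : List String) (out : List (String × Int)) : Prop := out = create_letter2num_alt keymap
instance (keymap : List String) (out : List (String × Int)) : Decidable (Spec_create_letter2num keymap out) := by unfold Spec_create_letter2num; infer_instance

-- ===== CLAIM (what is proved, stated in full; the proofs are below) =====
def Claim_equal_create_letter2num : Prop := ∀ (keymap : List String), Dom_create_letter2num keymap → Spec_create_letter2num keymap (create_letter2num keymap)

-- ===== LEMMAS AND PROOFS =====

-- the value B's second pass extracts from one grouped entry
def pvMinEntry (p : String × List Int) : String × Int := (p.1, PySem.List.minD p.2 (fun x => x) 0)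

-- A's single update step / B's single grouping step, named for the proofs
def pvStepA (d : PySem.Dict String Int) (ik : Int × Char) : PySem.Dict String Int :=
  let ks := String.mk [ik.2]
  match d.get? ks with
  | none => d.insert ks ik.1
  | some v => if v > ik.1 then d.insert ks ik.1 else d

def pvStepB (d : PySem.Dict String (List Int)) (ik : Int × Char) : PySem.Dict String (List Int) :=
  d.modify (String.mk [ik.2]) [] (· ++ [ik.1])

-- the invariant tying A's dict to B's table
def pvInv (dA : PySem.Dict String Int) (dB : PySem.Dict String (List Int)) : Prop :=
  dA.items = dB.items.map pvMinEntry ∧ dB.keys.Nodup ∧ ∀ p ∈ dB.items, p.2 ≠ []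

lemma pv_contains_rel (dA : PySem.Dict String Int) (dB : PySem.Dict String (List Int))
    (h : dA.items = dB.items.map pvMinEntry) (k : String) :
    dA.contains k = dB.contains k := by
  simp only [PySem.Dict.contains, h, List.any_map]
  rfl

lemma pv_get?_rel (dA : PySem.Dict String Int) (dB : PySem.Dict String (List Int))
    (h : dA.items = dB.items.map pvMinEntry) (k : String) :
    dA.get? k = (dB.get? k).map (fun ps => PySem.List.minD ps (fun x => x) 0) := by
  simp only [PySem.Dict.get?, h, List.find?_map, Option.map_map]
  rfl

lemma pv_insert_rel (dA : PySem.Dict String Int) (dB : PySem.Dict String (List Int))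
    (h : dA.items = dB.items.map pvMinEntry) (k : String) (w : List Int) :
    (dA.insert k (PySem.List.minD w (fun x => x) 0)).items = (dB.insert k w).items.map pvMinEntry := by
  have hc := pv_contains_rel dA dB h k
  by_cases hk : dB.contains k = true
  · rw [PySem.Dict.items_insert_of_contains _ _ (hc.trans hk),
        PySem.Dict.items_insert_of_contains _ _ hk, h, List.map_map, List.map_map]
    refine List.map_congr_left ?_
    intro p _
    by_cases hpk : p.1 = k <;> simp [pvMinEntry, Function.comp, hpk]
  · have hk' : dB.contains k = false := by simpa using hk
    rw [PySem.Dict.items_insert_of_not_contains _ _ (hc.trans hk'),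
        PySem.Dict.items_insert_of_not_contains _ _ hk', h, List.map_append]
    simp [pvMinEntry]

lemma pv_insert_self (d : PySem.Dict String Int) (k : String) (v : Int)
    (hnd : d.keys.Nodup) (hget : d.get? k = some v) : d.insert k v = d := by
  apply PySem.Dict.ext
  have hc : d.contains k = true := by
    rw [PySem.Dict.contains_eq_isSome_get?, hget]; rfl
  rw [PySem.Dict.items_insert_of_contains _ _ hc]
  conv_rhs => rw [← List.map_id d.items]
  refine List.map_congr_left ?_
  intro p hp
  by_cases hpk : p.1 = k
  · have hp2 : (k, p.2) ∈ d.items := by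
      have : p = (k, p.2) := by rw [← hpk]
      rwa [this] at hp
    have : d.get? k = some p.2 := (PySem.Dict.get?_eq_some_iff_mem_items d k p.2 hnd).mpr hp2
    have hv : p.2 = v := by rw [this] at hget; exact (Option.some.inj hget)
    have hpkv : p = (k, v) := by rw [← hpk, ← hv]
    simp [hpkv]
  · simp [hpk]

lemma pv_min?_cons (x : Int) (xs : List Int) : (PySem.List.min? (x :: xs) (fun y => y)).isSome := by
  induction xs generalizing x with
  | nil => rfl
  | cons a t ih =>
    simp only [PySem.List.min?, List.foldl] at *
    split <;> exact ih _

lemma pv_min?_append_some (ps : List Int) (i m : Int)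
    (h : PySem.List.min? ps (fun y => y) = some m) :
    PySem.List.min? (ps ++ [i]) (fun y => y) = if i < m then some i else some m := by
  simp only [PySem.List.min?] at h ⊢
  rw [List.foldl_append, h]
  rfl

lemma pv_keys_rel (dA : PySem.Dict String Int) (dB : PySem.Dict String (List Int))
    (h : dA.items = dB.items.map pvMinEntry) : dA.keys = dB.keys := by
  simp only [PySem.Dict.keys, h, List.map_map]
  rfl

lemma pv_minD_singleton (i : Int) : PySem.List.minD [i] (fun y => y) 0 = i := rfl

lemma pv_nonempty_insert (dB : PySem.Dict String (List Int)) (k : String) (w : List Int)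
    (hw : w ≠ []) (hne : ∀ p ∈ dB.items, p.2 ≠ []) :
    ∀ p ∈ (dB.insert k w).items, p.2 ≠ [] := by
  intro p hp
  rcases (PySem.Dict.mem_items_insert dB k w p).mp hp with h1 | h2
  · rw [h1]; exact hw
  · exact hne p h2.1

lemma pv_step (dA : PySem.Dict String Int) (dB : PySem.Dict String (List Int)) (ik : Int × Char)
    (h : pvInv dA dB) : pvInv (pvStepA dA ik) (pvStepB dB ik) := by
  obtain ⟨hit, hnd, hne⟩ := h
  have hndA : dA.keys.Nodup := by rw [pv_keys_rel dA dB hit]; exact hnd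
  have hrel := pv_get?_rel dA dB hit (String.mk [ik.2])
  cases hB : dB.get? (String.mk [ik.2]) with
  | none =>
    have hA : dA.get? (String.mk [ik.2]) = none := by rw [hrel, hB]; rfl
    have hgd : dB.getD (String.mk [ik.2]) [] = [] := by simp [PySem.Dict.getD, hB]
    refine ⟨?_, ?_, ?_⟩
    · simp only [pvStepA, pvStepB, PySem.Dict.modify, hgd, hA, List.nil_append]
      have := pv_insert_rel dA dB hit (String.mk [ik.2]) [ik.1]
      rwa [pv_minD_singleton] at this
    · simp only [pvStepB]
      exact PySem.Dict.nodup_keys_insert _ _ _ hnd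
    · simp only [pvStepB, PySem.Dict.modify, hgd, List.nil_append]
      exact pv_nonempty_insert dB _ [ik.1] (by simp) hne
  | some ps =>
    have hA : dA.get? (String.mk [ik.2]) = some (PySem.List.minD ps (fun y => y) 0) := by
      rw [hrel, hB]; rfl
    have hgd : dB.getD (String.mk [ik.2]) [] = ps := by simp [PySem.Dict.getD, hB]
    have hps : ps ≠ [] := hne _ (PySem.Dict.mem_items_of_get?_eq_some dB hB)
    obtain ⟨q, t, rfl⟩ : ∃ q t, ps = q :: t := by
      cases ps with
      | nil => exact absurd rfl hps
      | cons q t => exact ⟨q, t, rfl⟩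
    obtain ⟨m, hm⟩ : ∃ m, PySem.List.min? (q :: t) (fun y => y) = some m := by
      have := pv_min?_cons q t
      cases hx : PySem.List.min? (q :: t) (fun y => y) with
      | none => rw [hx] at this; exact absurd this (by simp)
      | some m => exact ⟨m, rfl⟩
    have hv : PySem.List.minD (q :: t) (fun y => y) 0 = m := by
      simp [PySem.List.minD, hm]
    have hw : PySem.List.minD ((q :: t) ++ [ik.1]) (fun y => y) 0 =
        if ik.1 < m then ik.1 else m := by
      rw [PySem.List.minD, pv_min?_append_some _ _ _ hm]
      split <;> rfl
    refine ⟨?_, ?_, ?_⟩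
    · simp only [pvStepA, pvStepB, PySem.Dict.modify, hgd, hA, hv]
      have hins := pv_insert_rel dA dB hit (String.mk [ik.2]) ((q :: t) ++ [ik.1])
      rw [hw] at hins
      by_cases hlt : m > ik.1
      · rw [if_pos (show ik.1 < m from hlt)] at hins
        rw [if_pos hlt]
        exact hins
      · rw [if_neg (show ¬ ik.1 < m from hlt)] at hins
        rw [if_neg hlt, ← hins,
          pv_insert_self dA (String.mk [ik.2]) m hndA (by rw [hA, hv])]
    · simp only [pvStepB]
      exact PySem.Dict.nodup_keys_insert _ _ _ hnd
    · simp only [pvStepB, PySem.Dict.modify, hgd]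
      exact pv_nonempty_insert dB _ _ (by simp) hne

lemma pv_fold (l : List (Int × Char)) (dA : PySem.Dict String Int) (dB : PySem.Dict String (List Int))
    (h : pvInv dA dB) : pvInv (l.foldl pvStepA dA) (l.foldl pvStepB dB) := by
  induction l generalizing dA dB with
  | nil => exact h
  | cons x t ih => exact ih _ _ (pv_step dA dB x h)

lemma pv_fold_outer (keymap : List String) (dA : PySem.Dict String Int) (dB : PySem.Dict String (List Int))
    (h : pvInv dA dB) :
    pvInv (keymap.foldl (fun d key => (PySem.List.enumerate key.toList 1).foldl pvStepA d) dA)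
          (keymap.foldl (fun d key => (PySem.List.enumerate key.toList 1).foldl pvStepB d) dB) := by
  induction keymap generalizing dA dB with
  | nil => exact h
  | cons x t ih => exact ih _ _ (pv_fold _ _ _ h)

-- ===== VERDICT (by name: the statement is the Claim_ definition above) =====
theorem create_letter2num_spec : Claim_equal_create_letter2num := by
  intro keymap _
  have h0 : pvInv PySem.Dict.empty PySem.Dict.empty := by
    refine ⟨rfl, ?_, ?_⟩ <;> simp [PySem.Dict.empty, PySem.Dict.keys]
  have h := pv_fold_outer keymap PySem.Dict.empty PySem.Dict.empty h0
  unfold Spec_create_letter2num create_letter2num create_letter2num_alt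
  simpa [pvStepA, pvStepB, pvMinEntry] using h.1
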